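-- pv_equiv track=rewrite | github.com/jAzzvdou/2DGame | Sources/verify_map.py | invincible_map
-- ===== SOURCE A (Python) =====
-- def invincible_map(maps):
--     '''
--         Função para verificar se o mapa é invencível.
--     '''
--     player_pos = None
--     coin_pos = set()
--     exit_pos = None
--     for y, line in enumerate(maps):
--         for x, i in enumerate(line):
--             if (i == 'P'):
--                 player_pos = (y, x)
--             elif (i == 'C'):
--                 coin_pos.add((y, x))
--             elif (i == 'E'):
--                 exit_pos = (y, x)
--
--     def floodfill(y, x, visited, ignore_exit=True):
--         if ((y, x) in visited or maps[y][x] == '1' or (ignore_exit and maps[y][x] == 'E')):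
--             return
--         visited.add((y, x))
--         directions = [(-1, 0), (1, 0), (0, -1), (0, 1)]
--         for dy, dx in directions:
--             ny, nx = y + dy, x + dx
--             if (0 <= ny < len(maps) and 0 <= nx < len(maps[0])):
--                 floodfill(ny, nx, visited, ignore_exit)
--
--     visited = set()
--     floodfill(player_pos[0], player_pos[1], visited, ignore_exit=True)
--     if (not coin_pos.issubset(visited)):
--         return True
--     visited.clear()
--     floodfill(player_pos[0], player_pos[1], visited, ignore_exit=False)
--     if (exit_pos not in visited):
--         return True
--     return False
-- ===== SOURCE B (Python) =====
-- def invincible_map(maps):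
--     '''
--         Funcao para verificar se o mapa e invencivel.
--     '''
--     player_pos = None
--     coin_pos = set()
--     exit_pos = None
--     for y, line in enumerate(maps):
--         for x, i in enumerate(line):
--             if (i == 'P'):
--                 player_pos = (y, x)
--             elif (i == 'C'):
--                 coin_pos.add((y, x))
--             elif (i == 'E'):
--                 exit_pos = (y, x)
--
--     def flood(ignore_exit):
--         visited = set()
--         stack = [player_pos]
--         while stack:
--             y, x = stack.pop()
--             if ((y, x) in visited or maps[y][x] == '1' or (ignore_exit and maps[y][x] == 'E')):
--                 continue
--             visited.add((y, x))
--             for dy, dx in ((0, 1), (0, -1), (1, 0), (-1, 0)):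
--                 ny, nx = y + dy, x + dx
--                 if (0 <= ny < len(maps) and 0 <= nx < len(maps[0])):
--                     stack.append((ny, nx))
--         return visited
--
--     visited = flood(True)
--     if (not coin_pos.issubset(visited)):
--         return True
--     return exit_pos not in flood(False)
-- ===== Notes on version B (the rewrite author's own statement) =====
-- stated objective: alternative
-- what changed: The recursive floodfill helper is replaced by an iterative flood fill with an explicit stack (pop a cell, skip if visited/wall/ignored exit, else mark it and push its in-bounds neighbours), run twice exactly as A runs its recursion; the initial scan and the two checks are unchanged.
-- outside the precondition, e.g. on invincible_map([['P', '1'], ['1']]): A returns True, B returns True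
import Mathlib
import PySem

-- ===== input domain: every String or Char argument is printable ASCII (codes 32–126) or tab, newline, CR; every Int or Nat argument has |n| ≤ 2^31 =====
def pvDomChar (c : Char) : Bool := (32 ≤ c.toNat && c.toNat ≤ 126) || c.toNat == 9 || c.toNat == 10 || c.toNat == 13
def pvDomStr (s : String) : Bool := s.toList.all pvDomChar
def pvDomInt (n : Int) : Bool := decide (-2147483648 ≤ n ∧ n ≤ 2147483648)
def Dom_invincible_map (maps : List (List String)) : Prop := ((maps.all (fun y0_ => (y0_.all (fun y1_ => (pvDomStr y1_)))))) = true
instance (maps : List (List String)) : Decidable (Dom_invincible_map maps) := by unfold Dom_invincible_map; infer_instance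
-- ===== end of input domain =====

-- B replaces A's recursive floodfill by an iterative flood fill over an explicit stack (alternative
-- decomposition, same cost); the scan for P/C/E and the two reachability checks are unchanged.
-- Both flood fills are totalized with a fuel counter (one unit per call/per popped cell); the fuel
-- 4*rows*cols+9 exceeds the possible number of calls/pops on every input admitted by Pre_.

-- ===== PORT A =====
-- maps[y][x] (none = IndexError)
def pvCell (maps : List (List String)) (y x : Int) : Option String :=
  (PySem.List.pyGet? maps y).bind (fun row => PySem.List.pyGet? row x)

-- the initial scan: (player_pos, coin_pos, exit_pos)
def pvScan (maps : List (List String)) :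
    Option (Int × Int) × PySem.Set (Int × Int) × Option (Int × Int) :=
  (PySem.List.enumerate maps 0).foldl (fun st yl =>
    (PySem.List.enumerate yl.2 0).foldl (fun st xi =>
      if xi.2 = "P" then (some (yl.1, xi.1), st.2.1, st.2.2)
      else if xi.2 = "C" then (st.1, PySem.Set.add st.2.1 (yl.1, xi.1), st.2.2)
      else if xi.2 = "E" then (st.1, st.2.1, some (yl.1, xi.1))
      else st) st) (none, PySem.Set.empty, none)

-- termination helper for the fuel-clamped mutual recursion below (cited by its decreasing_by)
theorem pvLexMin (t k a : Nat) :
    Prod.Lex (· < ·) (· < ·) (min t k, a + 1) (k, a + 2) := by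
  rcases Nat.lt_or_eq_of_le (Nat.min_le_right t k) with h | h
  · exact Prod.Lex.left _ _ h
  · rw [h]; exact Prod.Lex.right _ (Nat.lt_succ_self _)

mutual
-- A's recursive floodfill; returns (visited, remaining fuel), one fuel unit per call.
-- 'min r.2 k' is a fuel clamp needed only for termination: it is the identity, since the
-- returned fuel never exceeds the fuel passed in (pvFloodA_fuel_le below).
def pvFloodA (maps : List (List String)) (k : Nat) (y x : Int)
    (v : PySem.Set (Int × Int)) (ig : Bool) : PySem.Set (Int × Int) × Nat :=
  match k with
  | 0 => (v, 0)
  | Nat.succ k' =>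
    if PySem.Set.contains v (y, x) then (v, k')
    else
      match pvCell maps y x with
      | none => (v, k')        -- Python raises IndexError here (outside Pre_)
      | some c =>
        if c = "1" ∨ (ig = true ∧ c = "E") then (v, k')
        else pvFloodDirsA maps k' [(-1, 0), (1, 0), (0, -1), (0, 1)] y x
               (PySem.Set.add v (y, x)) ig
  termination_by (k, 0)
  decreasing_by exact Prod.Lex.left _ _ (Nat.lt_succ_self _)

-- the 'for dy, dx in directions' loop of A's floodfill
def pvFloodDirsA (maps : List (List String)) (k : Nat) (ds : List (Int × Int)) (y x : Int)
    (v : PySem.Set (Int × Int)) (ig : Bool) : PySem.Set (Int × Int) × Nat :=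
  match ds with
  | [] => (v, k)
  | d :: ds' =>
    let ny := y + d.1
    let nx := x + d.2
    if 0 ≤ ny ∧ ny < (maps.length : Int) ∧ 0 ≤ nx ∧ nx < ((maps.headD []).length : Int) then
      let r := pvFloodA maps k ny nx v ig
      pvFloodDirsA maps (min r.2 k) ds' y x r.1 ig
    else pvFloodDirsA maps k ds' y x v ig
  termination_by (k, ds.length + 1)
  decreasing_by
  · exact Prod.Lex.right _ (Nat.zero_lt_succ _)
  · exact pvLexMin _ k ds'.length
  · exact Prod.Lex.right _ (Nat.lt_succ_self _)
end

def invincible_map (maps : List (List String)) : Bool :=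
  let st := pvScan maps
  match st.1 with
  | none => false              -- Python raises TypeError (player_pos is None; outside Pre_)
  | some p =>
    let fuel := 4 * maps.length * (maps.headD []).length + 9
    let v1 := (pvFloodA maps fuel p.1 p.2 PySem.Set.empty true).1
    if !(PySem.Set.issubset st.2.1 v1) then true
    else
      let v2 := (pvFloodA maps fuel p.1 p.2 PySem.Set.empty false).1
      if !(match st.2.2 with | some e => PySem.Set.contains v2 e | none => false) then true
      else false

-- ===== PORT B =====
def pvScanB (maps : List (List String)) :
    Option (Int × Int) × PySem.Set (Int × Int) × Option (Int × Int) :=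
  (PySem.List.enumerate maps 0).foldl (fun st yl =>
    (PySem.List.enumerate yl.2 0).foldl (fun st xi =>
      if xi.2 = "P" then (some (yl.1, xi.1), st.2.1, st.2.2)
      else if xi.2 = "C" then (st.1, PySem.Set.add st.2.1 (yl.1, xi.1), st.2.2)
      else if xi.2 = "E" then (st.1, st.2.1, some (yl.1, xi.1))
      else st) st) (none, PySem.Set.empty, none)


-- B's iterative flood fill: the Lean list is the Python stack reversed (append = cons, pop = head);
-- fuel counts popped cells (one unit per iteration of the while loop).
def pvFloodB (maps : List (List String)) (k : Nat) (stack : List (Int × Int))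
    (v : PySem.Set (Int × Int)) (ig : Bool) : PySem.Set (Int × Int) :=
  match k, stack with
  | 0, _ => v
  | Nat.succ _, [] => v
  | Nat.succ k', (y, x) :: rest =>
    if PySem.Set.contains v (y, x) then pvFloodB maps k' rest v ig
    else
      match pvCell maps y x with
      | none => v              -- Python raises IndexError here (outside Pre_)
      | some c =>
        if c = "1" ∨ (ig = true ∧ c = "E") then pvFloodB maps k' rest v ig
        else
          let stack' := [((0 : Int), (1 : Int)), (0, -1), (1, 0), (-1, 0)].foldl (fun s d =>
            let ny := y + d.1
            let nx := x + d.2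
            if 0 ≤ ny ∧ ny < (maps.length : Int) ∧ 0 ≤ nx ∧ nx < ((maps.headD []).length : Int)
            then (ny, nx) :: s else s) rest
          pvFloodB maps k' stack' (PySem.Set.add v (y, x)) ig


def invincible_map_alt (maps : List (List String)) : Bool :=
  let st := pvScanB maps
  match st.1 with
  | none => false              -- Python raises TypeError (outside Pre_)
  | some p =>
    let fuel := 4 * maps.length * (maps.headD []).length + 9
    let v1 := pvFloodB maps fuel [p] PySem.Set.empty true
    if !(PySem.Set.issubset st.2.1 v1) then true
    else
      let v2 := pvFloodB maps fuel [p] PySem.Set.empty false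
      !(match st.2.2 with | some e => PySem.Set.contains v2 e | none => false)

-- ===== PRECONDITION & SPEC =====
-- Pre_ = a player cell 'P' exists (else Python raises TypeError) and no row is shorter than row 0
-- (else the flood fill can index past a short row: IndexError). This also excludes some ragged maps
-- on which A happens to return because walls stop the flood before any short row is probed.
def Pre_invincible_map (maps : List (List String)) : Prop :=
  (∃ row ∈ maps, "P" ∈ row) ∧ ∀ row ∈ maps, (maps.headD []).length ≤ row.length
instance (maps : List (List String)) : Decidable (Pre_invincible_map maps) := by
  unfold Pre_invincible_map; infer_instance

def pvWitness_invincible_map : List (List String) := [["P", "C"], ["0", "E"]]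

def Spec_invincible_map (maps : List (List String)) (out : Bool) : Prop := out = invincible_map_alt maps
instance (maps : List (List String)) (out : Bool) : Decidable (Spec_invincible_map maps out) := by unfold Spec_invincible_map; infer_instance

-- ===== CLAIM (what is proved, stated in full; the proofs are below) =====
def Claim_equal_invincible_map : Prop := ∀ (maps : List (List String)), Dom_invincible_map maps → Pre_invincible_map maps → Spec_invincible_map maps (invincible_map maps)

-- ===== LEMMAS AND PROOFS =====

theorem pvFloodDirsA_fuel_le (maps : List (List String)) (ds : List (Int × Int)) :
    ∀ (k : Nat) (y x : Int) (v : PySem.Set (Int × Int)) (ig : Bool),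
      (pvFloodDirsA maps k ds y x v ig).2 ≤ k := by
  induction ds with
  | nil => intro k y x v ig; rw [pvFloodDirsA.eq_def]
  | cons d ds' ih =>
    intro k y x v ig
    rw [pvFloodDirsA.eq_def]
    simp only
    split
    · exact le_trans (ih _ _ _ _ _) (Nat.min_le_right _ _)
    · exact ih _ _ _ _ _

theorem pvFloodA_fuel_le (maps : List (List String)) (k : Nat) (y x : Int)
    (v : PySem.Set (Int × Int)) (ig : Bool) : (pvFloodA maps k y x v ig).2 ≤ k := by
  cases k with
  | zero => rw [pvFloodA.eq_def]
  | succ k' =>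
    rw [pvFloodA.eq_def]
    simp only
    split
    · omega
    · split
      · omega
      · split
        · omega
        · exact le_trans (pvFloodDirsA_fuel_le maps _ k' y x _ ig) (Nat.le_succ _)
theorem pvFloodB_nil (maps : List (List String)) (k : Nat) (v : PySem.Set (Int × Int)) (ig : Bool) :
    pvFloodB maps k [] v ig = v := by cases k <;> rfl

def pvNbrs (maps : List (List String)) (ds : List (Int × Int)) (y x : Int) : List (Int × Int) :=
  ds.filterMap (fun d =>
    let ny := y + d.1
    let nx := x + d.2
    if 0 ≤ ny ∧ ny < (maps.length : Int) ∧ 0 ≤ nx ∧ nx < ((maps.headD []).length : Int)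
    then some (ny, nx) else none)

theorem pvPush_eq (maps : List (List String)) (y x : Int) (rest : List (Int × Int)) :
    [((0 : Int), (1 : Int)), (0, -1), (1, 0), (-1, 0)].foldl (fun s d =>
      let ny := y + d.1
      let nx := x + d.2
      if 0 ≤ ny ∧ ny < (maps.length : Int) ∧ 0 ≤ nx ∧ nx < ((maps.headD []).length : Int)
      then (ny, nx) :: s else s) rest
    = pvNbrs maps [(-1, 0), (1, 0), (0, -1), (0, 1)] y x ++ rest := by
  simp only [pvNbrs, List.foldl, List.filterMap]
  split_ifs <;> simp_all

theorem pvCell_isSome (maps : List (List String))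
    (hW : ∀ row ∈ maps, (maps.headD []).length ≤ row.length) (ny nx : Int)
    (h : 0 ≤ ny ∧ ny < (maps.length : Int) ∧ 0 ≤ nx ∧ nx < ((maps.headD []).length : Int)) :
    pvCell maps ny nx ≠ none := by
  obtain ⟨h1, h2, h3, h4⟩ := h
  have hy : ny.toNat < maps.length := by omega
  have hrow := hW maps[ny.toNat] (List.getElem_mem hy)
  have hx : nx.toNat < maps[ny.toNat].length := by omega
  have e1 : PySem.List.pyGet? maps ny = some maps[ny.toNat] := by
    rw [PySem.List.pyGet?_of_nonneg _ h1]; exact List.getElem?_eq_getElem hy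
  have e2 : PySem.List.pyGet? maps[ny.toNat] nx = some maps[ny.toNat][nx.toNat] := by
    rw [PySem.List.pyGet?_of_nonneg _ h3]; exact List.getElem?_eq_getElem hx
  simp [pvCell, e1, e2]
theorem pvFloodB_cons (maps : List (List String)) (k' : Nat) (y x : Int)
    (S : List (Int × Int)) (v : PySem.Set (Int × Int)) (ig : Bool) :
    pvFloodB maps (k' + 1) ((y, x) :: S) v ig
      = if PySem.Set.contains v (y, x) then pvFloodB maps k' S v ig
        else match pvCell maps y x with
          | none => v
          | some c =>
            if c = "1" ∨ (ig = true ∧ c = "E") then pvFloodB maps k' S v ig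
            else pvFloodB maps k' (pvNbrs maps [(-1, 0), (1, 0), (0, -1), (0, 1)] y x ++ S)
                   (PySem.Set.add v (y, x)) ig := by
  have h0 : pvFloodB maps (k' + 1) ((y, x) :: S) v ig
      = if PySem.Set.contains v (y, x) then pvFloodB maps k' S v ig
        else match pvCell maps y x with
          | none => v
          | some c =>
            if c = "1" ∨ (ig = true ∧ c = "E") then pvFloodB maps k' S v ig
            else pvFloodB maps k'
              ([((0 : Int), (1 : Int)), (0, -1), (1, 0), (-1, 0)].foldl (fun s d =>
                let ny := y + d.1
                let nx := x + d.2
                if 0 ≤ ny ∧ ny < (maps.length : Int) ∧ 0 ≤ nx ∧ nx < ((maps.headD []).length : Int)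
                then (ny, nx) :: s else s) S)
              (PySem.Set.add v (y, x)) ig := rfl
  rw [h0, pvPush_eq]
theorem pvFloodA_succ (maps : List (List String)) (k' : Nat) (y x : Int)
    (v : PySem.Set (Int × Int)) (ig : Bool) :
    pvFloodA maps (k' + 1) y x v ig
      = if PySem.Set.contains v (y, x) then (v, k')
        else match pvCell maps y x with
          | none => (v, k')
          | some c =>
            if c = "1" ∨ (ig = true ∧ c = "E") then (v, k')
            else pvFloodDirsA maps k' [(-1, 0), (1, 0), (0, -1), (0, 1)] y x
                   (PySem.Set.add v (y, x)) ig := by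
  rw [pvFloodA.eq_def]

theorem pvFloodDirsA_cons (maps : List (List String)) (k : Nat) (d : Int × Int)
    (ds' : List (Int × Int)) (y x : Int) (v : PySem.Set (Int × Int)) (ig : Bool) :
    pvFloodDirsA maps k (d :: ds') y x v ig
      = if 0 ≤ y + d.1 ∧ y + d.1 < (maps.length : Int) ∧ 0 ≤ x + d.2 ∧
           x + d.2 < ((maps.headD []).length : Int) then
          pvFloodDirsA maps (min (pvFloodA maps k (y + d.1) (x + d.2) v ig).2 k) ds' y x
            (pvFloodA maps k (y + d.1) (x + d.2) v ig).1 ig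
        else pvFloodDirsA maps k ds' y x v ig := by
  rw [pvFloodDirsA.eq_def]

theorem pvFloodA_zero (maps : List (List String)) (y x : Int)
    (v : PySem.Set (Int × Int)) (ig : Bool) : pvFloodA maps 0 y x v ig = (v, 0) := by
  rw [pvFloodA.eq_def]

theorem pvFloodDirsA_nil (maps : List (List String)) (k : Nat) (y x : Int)
    (v : PySem.Set (Int × Int)) (ig : Bool) : pvFloodDirsA maps k [] y x v ig = (v, k) := by
  rw [pvFloodDirsA.eq_def]
mutual
theorem pv_simA (maps : List (List String))
    (hW : ∀ row ∈ maps, (maps.headD []).length ≤ row.length) (k : Nat) (y x : Int)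
    (v : PySem.Set (Int × Int)) (ig : Bool) (S : List (Int × Int))
    (hc : pvCell maps y x = none → S = []) :
    pvFloodB maps k ((y, x) :: S) v ig
      = pvFloodB maps (pvFloodA maps k y x v ig).2 S (pvFloodA maps k y x v ig).1 ig := by
  cases k with
  | zero => rw [pvFloodA_zero]; simp [pvFloodB]
  | succ k' =>
    rw [pvFloodA_succ, pvFloodB_cons]
    by_cases hm : PySem.Set.contains v (y, x)
    · simp only [if_pos hm]
    · simp only [if_neg hm]
      cases hcell : pvCell maps y x with
      | none => rw [hc hcell, pvFloodB_nil]
      | some c =>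
        by_cases hw : c = "1" ∨ (ig = true ∧ c = "E")
        · simp only [if_pos hw]
        · simp only [if_neg hw]
          exact pv_simDirs maps hW k' [(-1, 0), (1, 0), (0, -1), (0, 1)] y x
            (PySem.Set.add v (y, x)) ig S
  termination_by (k, 0)
  decreasing_by exact Prod.Lex.left _ _ (by omega)

theorem pv_simDirs (maps : List (List String))
    (hW : ∀ row ∈ maps, (maps.headD []).length ≤ row.length) (k : Nat)
    (ds : List (Int × Int)) (y x : Int) (v : PySem.Set (Int × Int)) (ig : Bool)
    (S : List (Int × Int)) :
    pvFloodB maps k (pvNbrs maps ds y x ++ S) v ig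
      = pvFloodB maps (pvFloodDirsA maps k ds y x v ig).2 S (pvFloodDirsA maps k ds y x v ig).1 ig := by
  match ds with
  | [] => rw [pvFloodDirsA_nil]; simp [pvNbrs]
  | d :: ds' =>
    rw [pvFloodDirsA_cons]
    by_cases hin : 0 ≤ y + d.1 ∧ y + d.1 < (maps.length : Int) ∧ 0 ≤ x + d.2 ∧
        x + d.2 < ((maps.headD []).length : Int)
    · have hnb : pvNbrs maps (d :: ds') y x = (y + d.1, x + d.2) :: pvNbrs maps ds' y x := by
        simp only [pvNbrs, List.filterMap_cons, if_pos hin]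
      rw [hnb, List.cons_append]
      rw [pv_simA maps hW k (y + d.1) (x + d.2) v ig (pvNbrs maps ds' y x ++ S)
        (fun h => absurd h (pvCell_isSome maps hW _ _ hin))]
      have hle := pvFloodA_fuel_le maps k (y + d.1) (x + d.2) v ig
      simp only [if_pos hin, Nat.min_eq_left hle]
      exact pv_simDirs maps hW (pvFloodA maps k (y + d.1) (x + d.2) v ig).2 ds' y x
        (pvFloodA maps k (y + d.1) (x + d.2) v ig).1 ig S
    · have hnb : pvNbrs maps (d :: ds') y x = pvNbrs maps ds' y x := by
        simp only [pvNbrs, List.filterMap_cons, if_neg hin]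
      rw [hnb]
      simp only [if_neg hin]
      exact pv_simDirs maps hW k ds' y x v ig S
  termination_by (k, ds.length + 1)
  decreasing_by
  all_goals first
    | exact Prod.Lex.right _ (by simp only [List.length_cons]; omega)
    | (rcases Nat.lt_or_eq_of_le (pvFloodA_fuel_le maps k (y + d.1) (x + d.2) v ig) with h | h
       · exact Prod.Lex.left _ _ h
       · rw [h]; exact Prod.Lex.right _ (by simp only [List.length_cons]; omega))
end

theorem pvScanB_eq (maps : List (List String)) : pvScanB maps = pvScan maps := rfl

-- ===== VERDICT (by name: the statement is the Claim_ definition above) =====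
theorem invincible_map_spec : Claim_equal_invincible_map := by
  intro maps _ hpre
  obtain ⟨-, hW⟩ := hpre
  unfold Spec_invincible_map invincible_map invincible_map_alt
  rw [pvScanB_eq]
  cases hp : (pvScan maps).1 with
  | none => simp [hp]
  | some p =>
    have key : ∀ ig, pvFloodB maps (4 * maps.length * (maps.headD []).length + 9) [p]
        PySem.Set.empty ig
        = (pvFloodA maps (4 * maps.length * (maps.headD []).length + 9) p.1 p.2
            PySem.Set.empty ig).1 := by
      intro ig
      have h := pv_simA maps hW (4 * maps.length * (maps.headD []).length + 9) p.1 p.2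
        PySem.Set.empty ig [] (fun _ => rfl)
      simpa [pvFloodB_nil] using h
    simp only [hp, key]
    cases hsub : PySem.Set.issubset (pvScan maps).2.1
        ((pvFloodA maps (4 * maps.length * (maps.headD []).length + 9) p.1 p.2
          PySem.Set.empty true).1) with
    | false => simp
    | true =>
      simp only [Bool.not_true, Bool.false_eq_true, if_false]
      cases hm : (match (pvScan maps).2.2 with
        | some e => PySem.Set.contains ((pvFloodA maps
            (4 * maps.length * (maps.headD []).length + 9) p.1 p.2 PySem.Set.empty false).1) e
        | none => false) <;> simp
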